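-- pv_equiv track=rewrite | github.com/jpark527/Fall2018 | Python/MITX/6.00.2X/bruteForceAlgorithms.py | yieldAllCombos
-- ===== SOURCE A (Python) =====
-- def yieldAllCombos(items):
--     """
--         Generates all combinations of N items into two bags, whereby each
--         item is in one or zero bags.
--
--         Yields a tuple, (bag1, bag2), where each bag is represented as a list
--         of which item(s) are in each bag.
--     """
--     # Enumerate the 3**N possible combinations
--     N = len(items)
--     for i in range(3**N):
--         bag1, bag2 = list(), list()
--         for j in range(N):
--             if (i // (3 ** j)) % 3 == 1:
--                 bag1.append(items[j])
--             elif (i // (3 ** j)) % 3 == 2: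
--                 bag2.append(items[j])
--         yield bag1, bag2
-- ===== SOURCE B (Python) =====
-- def yieldAllCombos(items):
--     """Same combos in the same order, built incrementally: fold over the items
--     from last to first, tripling the combo list (skip / into bag1 / into bag2)
--     at each step, instead of decoding base-3 digits of a counter."""
--     combos = [([], [])]
--     for x in reversed(items):
--         combos = [out
--                   for b1, b2 in combos
--                   for out in ((b1, b2), ([x] + b1, b2), (b1, [x] + b2))]
--     yield from combos
-- ===== Notes on version B (the rewrite author's own statement) =====
-- stated objective: alternative
-- what changed: Instead of counting i through range(3**N) and decoding base-3 digits with //, ** and % for every output, B folds over the items from last to first, tripling the combo list (skip / into bag1 / into bag2) at each step, producing the same pairs in the same order incrementally.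
import Mathlib
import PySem

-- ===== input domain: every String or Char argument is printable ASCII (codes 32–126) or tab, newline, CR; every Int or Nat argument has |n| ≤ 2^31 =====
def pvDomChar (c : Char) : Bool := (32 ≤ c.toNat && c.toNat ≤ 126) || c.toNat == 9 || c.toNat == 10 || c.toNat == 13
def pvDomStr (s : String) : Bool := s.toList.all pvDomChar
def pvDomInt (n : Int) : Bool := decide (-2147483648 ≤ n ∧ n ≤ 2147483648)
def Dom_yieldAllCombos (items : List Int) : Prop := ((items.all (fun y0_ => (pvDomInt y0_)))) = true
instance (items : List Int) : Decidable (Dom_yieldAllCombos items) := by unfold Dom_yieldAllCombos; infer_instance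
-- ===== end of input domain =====

-- B replaces A's counter over range(3**N) with base-3 digit decoding by an incremental
-- fold that triples the combo list per item (same pairs, same order).

-- ===== PORT A =====
-- inner 'for j in range(N)' loop of A, building (bag1, bag2) for counter value i.
-- 3 ** j is ported as 3 ^ j.toNat: j ranges over range(N), so j ≥ 0 and this is exact.
-- items[j] is ported with pyGetD (default 0): j < N = len(items), so the index is
-- always in range and the default is never used (exact).
def pyAInner (items : List Int) (i : Int) : List Int × List Int :=
  (PySem.List.pyRange 0 (items.length : Int) 1).foldl
    (fun bags j =>
      if PySem.Int.mod (PySem.Int.floordiv i (3 ^ j.toNat)) 3 = 1 then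
        (bags.1 ++ [PySem.List.pyGetD items j 0], bags.2)
      else if PySem.Int.mod (PySem.Int.floordiv i (3 ^ j.toNat)) 3 = 2 then
        (bags.1, bags.2 ++ [PySem.List.pyGetD items j 0])
      else bags)
    ([], [])

def yieldAllCombos (items : List Int) : List (List Int × List Int) :=
  (PySem.List.pyRange 0 ((3 ^ items.length : Nat) : Int) 1).map (pyAInner items)

-- ===== PORT B =====
-- Source B: combos = [([],[])]; for x in reversed(items): triple the list; yield from combos.
def yieldAllCombos_alt (items : List Int) : List (List Int × List Int) :=
  items.reverse.foldl
    (fun combos x =>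
      combos.flatMap (fun p => [(p.1, p.2), (x :: p.1, p.2), (p.1, x :: p.2)]))
    [([], [])]

-- ===== PRECONDITION & SPEC =====
def Spec_yieldAllCombos (items : List Int) (out : List (List Int × List Int)) : Prop := out = yieldAllCombos_alt items
instance (items : List Int) (out : List (List Int × List Int)) : Decidable (Spec_yieldAllCombos items out) := by unfold Spec_yieldAllCombos; infer_instance

-- ===== CLAIM (what is proved, stated in full; the proofs are below) =====
def Claim_equal_yieldAllCombos : Prop := ∀ (items : List Int), Dom_yieldAllCombos items → Spec_yieldAllCombos items (yieldAllCombos items)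

-- ===== LEMMAS AND PROOFS =====

-- B's recursion, read off from the fold over the reversed list.
theorem alt_nil : yieldAllCombos_alt [] = [([], [])] := rfl

theorem alt_cons (x : Int) (xs : List Int) :
    yieldAllCombos_alt (x :: xs) =
      (yieldAllCombos_alt xs).flatMap
        (fun p => [(p.1, p.2), (x :: p.1, p.2), (p.1, x :: p.2)]) := by
  simp [yieldAllCombos_alt, List.foldl_append]

-- A's inner loop only appends to .1 or .2: starting bags factor out.
theorem pyAInner_fold_init (items : List Int) (i : Int) (l : List Int) (b1 b2 : List Int) :
    l.foldl
      (fun bags j =>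
        if PySem.Int.mod (PySem.Int.floordiv i (3 ^ j.toNat)) 3 = 1 then
          (bags.1 ++ [PySem.List.pyGetD items j 0], bags.2)
        else if PySem.Int.mod (PySem.Int.floordiv i (3 ^ j.toNat)) 3 = 2 then
          (bags.1, bags.2 ++ [PySem.List.pyGetD items j 0])
        else bags)
      (b1, b2)
    = (b1 ++ (l.foldl
        (fun bags j =>
          if PySem.Int.mod (PySem.Int.floordiv i (3 ^ j.toNat)) 3 = 1 then
            (bags.1 ++ [PySem.List.pyGetD items j 0], bags.2)
          else if PySem.Int.mod (PySem.Int.floordiv i (3 ^ j.toNat)) 3 = 2 then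
            (bags.1, bags.2 ++ [PySem.List.pyGetD items j 0])
          else bags)
        ([], [])).1,
       b2 ++ (l.foldl
        (fun bags j =>
          if PySem.Int.mod (PySem.Int.floordiv i (3 ^ j.toNat)) 3 = 1 then
            (bags.1 ++ [PySem.List.pyGetD items j 0], bags.2)
          else if PySem.Int.mod (PySem.Int.floordiv i (3 ^ j.toNat)) 3 = 2 then
            (bags.1, bags.2 ++ [PySem.List.pyGetD items j 0])
          else bags)
        ([], [])).2) := by
  induction l generalizing b1 b2 with
  | nil => simp
  | cons j l ih =>
    simp only [List.foldl_cons]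
    by_cases h1 : PySem.Int.mod (PySem.Int.floordiv i (3 ^ j.toNat)) 3 = 1
    · rw [if_pos h1, if_pos h1,
        ih (b1 ++ [PySem.List.pyGetD items j 0]) b2,
        ih ([] ++ [PySem.List.pyGetD items j 0]) []]
      simp
    · by_cases h2 : PySem.Int.mod (PySem.Int.floordiv i (3 ^ j.toNat)) 3 = 2
      · rw [if_neg h1, if_neg h1, if_pos h2, if_pos h2,
          ih b1 (b2 ++ [PySem.List.pyGetD items j 0]),
          ih [] ([] ++ [PySem.List.pyGetD items j 0])]
        simp
      · rw [if_neg h1, if_neg h1, if_neg h2, if_neg h2]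
        exact ih b1 b2

-- base-3 digit shift: ((3k+d) // (3*3^m)) % 3 = (k // 3^m) % 3 for 0 ≤ d < 3.
theorem digit_shift (k d : Int) (m : Nat) (hd0 : 0 ≤ d) (hd3 : d < 3) :
    PySem.Int.floordiv (3 * k + d) (3 * 3 ^ m) = PySem.Int.floordiv k (3 ^ m) := by
  have hp : (0:Int) < 3 ^ m := by positivity
  have hp3 : (0:Int) < 3 * 3 ^ m := by positivity
  rw [PySem.Int.floordiv_eq_iff_of_pos hp3]
  have h1 : PySem.Int.floordiv k (3 ^ m) * 3 ^ m + PySem.Int.mod k (3 ^ m) = k :=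
    PySem.Int.floordiv_mul_add_mod k (3 ^ m)
  have h2 : 0 ≤ PySem.Int.mod k (3 ^ m) := PySem.Int.mod_nonneg k hp
  have h3 : PySem.Int.mod k (3 ^ m) < 3 ^ m := PySem.Int.mod_lt k hp
  constructor <;> nlinarith

-- A's per-counter pair at counter 3k+d, in terms of the pair at k for the tail.
theorem pyAInner_step (x : Int) (xs : List Int) (k d : Int) (hd0 : 0 ≤ d) (hd3 : d < 3) :
    pyAInner (x :: xs) (3 * k + d) =
      (let r := pyAInner xs k
       if d = 1 then (x :: r.1, r.2) else if d = 2 then (r.1, x :: r.2) else r) := by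
  have hrange : PySem.List.pyRange 0 ((x :: xs).length : Int) 1 =
      0 :: PySem.List.pyRange 1 ((xs.length : Int) + 1) 1 := by
    have hlen : ((x :: xs).length : Int) = (xs.length : Int) + 1 := by push_cast [List.length_cons]; ring
    rw [hlen, PySem.List.pyRange_one_cons (by positivity)]
    norm_num
  have hd' : PySem.Int.mod (PySem.Int.floordiv (3 * k + d) (3 ^ (0:Int).toNat)) 3 = d := by
    simp only [Int.toNat_zero, pow_zero]
    have h1 : PySem.Int.floordiv (3 * k + d) 1 = 3 * k + d := by
      rw [PySem.Int.floordiv_eq_ediv_of_pos (by norm_num : (0:Int) < 1)]; simp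
    rw [h1, PySem.Int.mod_eq_emod_of_pos (by norm_num : (0:Int) < 3)]
    omega
  have hget0 : PySem.List.pyGetD (x :: xs) 0 0 = x := by
    simp [PySem.List.pyGetD, PySem.List.pyGet?, PySem.List.pyIdx?]
  -- rewrite the tail fold (j = 1 .. N) as the fold of pyAInner xs k (j = 0 .. N-1)
  have htail : ∀ (b1 b2 : List Int),
      (PySem.List.pyRange 1 ((xs.length : Int) + 1) 1).foldl
        (fun bags j =>
          if PySem.Int.mod (PySem.Int.floordiv (3 * k + d) (3 ^ j.toNat)) 3 = 1 then
            (bags.1 ++ [PySem.List.pyGetD (x :: xs) j 0], bags.2)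
          else if PySem.Int.mod (PySem.Int.floordiv (3 * k + d) (3 ^ j.toNat)) 3 = 2 then
            (bags.1, bags.2 ++ [PySem.List.pyGetD (x :: xs) j 0])
          else bags)
        (b1, b2)
      = (b1 ++ (pyAInner xs k).1, b2 ++ (pyAInner xs k).2) := by
    intro b1 b2
    have hmap : PySem.List.pyRange 1 ((xs.length : Int) + 1) 1 =
        (PySem.List.pyRange 0 (xs.length : Int) 1).map (fun j => j + 1) := by
      rw [PySem.List.pyRange_one, PySem.List.pyRange_one, List.map_map]
      have : ((xs.length : Int) + 1 - 1).toNat = ((xs.length : Int) - 0).toNat := by omega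
      rw [this]
      apply List.map_congr_left
      intro a _
      simp [Function.comp]
      ring
    rw [hmap, List.foldl_map]
    rw [PySem.List.foldl_congr_mem (PySem.List.pyRange 0 (xs.length : Int) 1) _
      (fun bags j =>
        if PySem.Int.mod (PySem.Int.floordiv k (3 ^ j.toNat)) 3 = 1 then
          (bags.1 ++ [PySem.List.pyGetD xs j 0], bags.2)
        else if PySem.Int.mod (PySem.Int.floordiv k (3 ^ j.toNat)) 3 = 2 then
          (bags.1, bags.2 ++ [PySem.List.pyGetD xs j 0])
        else bags)
      (b1, b2) ?_]
    · exact pyAInner_fold_init xs k _ b1 b2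
    · intro bags j hj
      rw [PySem.List.mem_pyRange_one] at hj
      have hjn : (j + 1).toNat = j.toNat + 1 := by omega
      have hpow : (3:Int) ^ (j + 1).toNat = 3 * 3 ^ j.toNat := by
        rw [hjn, pow_succ]; ring
      have hfd : PySem.Int.floordiv (3 * k + d) (3 ^ (j + 1).toNat) =
          PySem.Int.floordiv k (3 ^ j.toNat) := by
        rw [hpow]; exact digit_shift k d j.toNat hd0 hd3
      have hget : PySem.List.pyGetD (x :: xs) (j + 1) 0 = PySem.List.pyGetD xs j 0 := by
        rw [PySem.List.pyGetD_of_nonneg _ _ (by omega : (0:Int) ≤ j + 1),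
          PySem.List.pyGetD_of_nonneg _ _ hj.1, hjn]
        rfl
      show (if PySem.Int.mod (PySem.Int.floordiv (3 * k + d) (3 ^ (j + 1).toNat)) 3 = 1 then
          (bags.1 ++ [PySem.List.pyGetD (x :: xs) (j + 1) 0], bags.2)
        else if PySem.Int.mod (PySem.Int.floordiv (3 * k + d) (3 ^ (j + 1).toNat)) 3 = 2 then
          (bags.1, bags.2 ++ [PySem.List.pyGetD (x :: xs) (j + 1) 0])
        else bags) = _
      rw [hfd, hget]
  conv_lhs => unfold pyAInner
  rw [hrange]
  simp only [List.foldl_cons, hd', hget0]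
  interval_cases d
  · simpa using htail [] []
  · simpa using htail [x] []
  · simpa using htail [] [x]

-- split range(3*n) into consecutive triples 3k, 3k+1, 3k+2.
theorem range_triple (n : Nat) :
    PySem.List.pyRange 0 ((3 * 3 ^ n : Nat) : Int) 1 =
      (PySem.List.pyRange 0 ((3 ^ n : Nat) : Int) 1).flatMap
        (fun k => [3 * k, 3 * k + 1, 3 * k + 2]) := by
  generalize (3 ^ n : Nat) = m
  induction m with
  | zero => simp [PySem.List.pyRange_one_eq_nil]
  | succ m ih =>
    have h1 : ((3 * (m + 1) : Nat) : Int) = (3 * m : Nat) + 3 := by push_cast; ring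
    have h2 : ((m + 1 : Nat) : Int) = (m : Nat) + 1 := by push_cast; ring
    rw [h1, h2]
    have e1 : PySem.List.pyRange 0 (((3 * m : Nat) : Int) + 3) 1 =
        PySem.List.pyRange 0 ((3 * m : Nat) : Int) 1 ++
          [((3 * m : Nat) : Int), ((3 * m : Nat) : Int) + 1, ((3 * m : Nat) : Int) + 2] := by
      rw [show (((3 * m : Nat) : Int) + 3) = ((((3 * m : Nat) : Int) + 2) + 1) by ring,
        PySem.List.pyRange_one_succ_right (by omega),
        show (((3 * m : Nat) : Int) + 2) = ((((3 * m : Nat) : Int) + 1) + 1) by ring,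
        PySem.List.pyRange_one_succ_right (by omega),
        PySem.List.pyRange_one_succ_right (by omega)]
      simp
    have e2 : PySem.List.pyRange 0 (((m : Nat) : Int) + 1) 1 =
        PySem.List.pyRange 0 ((m : Nat) : Int) 1 ++ [((m : Nat) : Int)] :=
      PySem.List.pyRange_one_succ_right (by omega)
    rw [e1, e2, List.flatMap_append, ih]
    simp only [List.flatMap_cons, List.flatMap_nil, List.append_nil]
    congr 1

-- A's recursion on the head item.
theorem portA_cons (x : Int) (xs : List Int) :
    yieldAllCombos (x :: xs) =
      (yieldAllCombos xs).flatMap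
        (fun p => [(p.1, p.2), (x :: p.1, p.2), (p.1, x :: p.2)]) := by
  unfold yieldAllCombos
  have hlen : (x :: xs).length = xs.length + 1 := rfl
  rw [hlen, pow_succ, show (3 ^ xs.length * 3 : Nat) = 3 * 3 ^ xs.length by ring,
    range_triple xs.length]
  rw [List.map_flatMap, List.flatMap_map]
  apply List.flatMap_congr
  intro k hk
  rw [PySem.List.mem_pyRange_one] at hk
  have h0 : pyAInner (x :: xs) (3 * k) =
      (let r := pyAInner xs k; r) := by
    have := pyAInner_step x xs k 0 (by norm_num) (by norm_num)
    simpa using this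
  have h1 := pyAInner_step x xs k 1 (by norm_num) (by norm_num)
  have h2 := pyAInner_step x xs k 2 (by norm_num) (by norm_num)
  norm_num at h1 h2
  simp [List.map_cons, h0, h1, h2]

theorem portA_nil : yieldAllCombos [] = [([], [])] := by decide

theorem ports_agree (items : List Int) : yieldAllCombos items = yieldAllCombos_alt items := by
  induction items with
  | nil => rw [portA_nil, alt_nil]
  | cons x xs ih => rw [portA_cons, alt_cons, ih]

-- ===== VERDICT (by name: the statement is the Claim_ definition above) =====
theorem yieldAllCombos_spec : Claim_equal_yieldAllCombos := by
  intro items _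
  unfold Spec_yieldAllCombos
  exact ports_agree items
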